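-- pv_equiv track=rewrite | github.com/coding-samu/Algo2 | completeGraph.py | orienta_grafo_completo
-- ===== SOURCE A (Python) =====
-- def orienta_grafo_completo(G: list[list[int]]) -> list[list[int]]:
--     n = len(G)  # Numero di nodi
--     archi_orientati = [[] for _ in range(len(G))]  # Lista per memorizzare gli archi orientati
--
--     # Iteriamo su tutte le coppie di nodi distinti
--     for u in range(n):
--         for v in range(u + 1, n):
--             # Orientiamo l'arco u → v se u è adiacente a v
--             if v in G[u]:
--                 archi_orientati[u].append(v)
--             # Altrimenti, orientiamo l'arco v → u
--             else:
--                 archi_orientati[v].append(u)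
--
--     return archi_orientati
-- ===== SOURCE B (Python) =====
-- def orienta_grafo_completo(G: list[list[int]]) -> list[list[int]]:
--     n = len(G)
--     # Inverted index built in one pass over all adjacency lists:
--     # rev[x] = set of nodes w whose adjacency list contains x (for 0 <= x < n).
--     rev = [set() for _ in range(n)]
--     for w, adj in enumerate(G):
--         for x in adj:
--             if 0 <= x < n:
--                 rev[x].add(w)
--     # Node u's oriented list = predecessors w<u with no edge recorded w->u,
--     # then the sorted in-range successors taken directly from G[u].
--     return [[w for w in range(u) if w not in rev[u]]
--             + sorted({x for x in G[u] if u < x < n})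
--             for u in range(n)]
-- ===== Notes on version B (the rewrite author's own statement) =====
-- stated objective: faster
-- what changed: B builds an inverted index rev[x] = {w : x in G[w]} (hash sets) in one pass over all adjacency lists, then emits each node's list as predecessors absent from rev[u] followed by sorted(set(...)) of G[u]'s own in-range entries, replacing A's pairwise sweep whose inner 'v in G[u]' rescans an adjacency list for every pair.
import Mathlib
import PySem

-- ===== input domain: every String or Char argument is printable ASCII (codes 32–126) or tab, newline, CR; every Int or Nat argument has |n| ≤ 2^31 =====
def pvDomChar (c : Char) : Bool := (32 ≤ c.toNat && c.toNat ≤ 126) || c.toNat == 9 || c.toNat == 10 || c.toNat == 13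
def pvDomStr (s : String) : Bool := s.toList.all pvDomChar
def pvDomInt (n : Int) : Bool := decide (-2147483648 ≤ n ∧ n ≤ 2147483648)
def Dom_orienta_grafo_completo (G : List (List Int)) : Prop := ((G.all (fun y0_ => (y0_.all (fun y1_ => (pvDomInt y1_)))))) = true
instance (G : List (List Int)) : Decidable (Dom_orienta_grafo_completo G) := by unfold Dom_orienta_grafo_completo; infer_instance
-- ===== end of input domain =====

-- B replaces A's pairwise membership sweep with an inverted index (rev[x] = nodes whose list
-- contains x) built in one pass over all adjacency lists, and reads each node's successors
-- directly off G[u] (filter + sorted set) instead of probing every v; objective: faster (set lookups replace per-pair list scans).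

-- ===== PORT A =====
-- 'v in G[u]' of Python
def pvAdj (G : List (List Int)) (u v : Nat) : Bool := (G.getD u []).contains (Int.ofNat v)

-- 'archi_orientati[i].append(x)'
def pvAppendAt (xs : List (List Int)) (i : Nat) (x : Int) : List (List Int) :=
  xs.set i (xs.getD i [] ++ [x])

def orienta_grafo_completo (G : List (List Int)) : List (List Int) :=
  let n := G.length
  (List.range n).foldl
    (fun acc u =>
      (List.range' (u + 1) (n - (u + 1))).foldl
        (fun acc v =>
          if pvAdj G u v then pvAppendAt acc u (Int.ofNat v)
          else pvAppendAt acc v (Int.ofNat u))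
        acc)
    ((List.range n).map (fun _ => ([] : List Int)))

-- ===== PORT B =====
-- inner loop 'for x in adj: if 0 <= x < n: rev[x].add(w)'
def pvRevStep (n : Nat) (rev : List (PySem.Set Int)) (w : Int) (adj : List Int) :
    List (PySem.Set Int) :=
  adj.foldl
    (fun rev x =>
      if 0 ≤ x ∧ x < (n : Int) then
        rev.set x.toNat (PySem.Set.add (rev.getD x.toNat []) w)
      else rev)
    rev

-- 'rev = [set() ...]; for w, adj in enumerate(G): ...'
def pvRev (G : List (List Int)) : List (PySem.Set Int) :=
  (PySem.List.enumerate G).foldl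
    (fun rev wa => pvRevStep G.length rev wa.1 wa.2)
    ((List.range G.length).map (fun _ => ([] : PySem.Set Int)))

def orienta_grafo_completo_alt (G : List (List Int)) : List (List Int) :=
  let n := G.length
  let rev := pvRev G
  (List.range n).map (fun u =>
    ((List.range u).filter (fun w => ¬ (Int.ofNat w) ∈ (rev.getD u []))).map
      (fun w => (Int.ofNat w))
    ++ PySem.List.sorted
        (PySem.Set.ofList ((G.getD u []).filter (fun x => (u : Int) < x ∧ x < (n : Int))))
        (fun x => x) false)

-- ===== PRECONDITION & SPEC =====
def Spec_orienta_grafo_completo (G : List (List Int)) (out : List (List Int)) : Prop := out = orienta_grafo_completo_alt G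
instance (G : List (List Int)) (out : List (List Int)) : Decidable (Spec_orienta_grafo_completo G out) := by unfold Spec_orienta_grafo_completo; infer_instance

-- ===== CLAIM (what is proved, stated in full; the proofs are below) =====
def Claim_equal_orienta_grafo_completo : Prop := ∀ (G : List (List Int)), Dom_orienta_grafo_completo G → Spec_orienta_grafo_completo G (orienta_grafo_completo G)

-- ===== LEMMAS AND PROOFS =====

-- the value of node i's list after the first k outer iterations of A's sweep
def pvState (G : List (List Int)) (k i : Nat) : List Int :=
  if i < k then
    ((List.range i).filter (fun w => ¬ pvAdj G w i)).map (fun w => (Int.ofNat w))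
    ++ ((List.range' (i + 1) (G.length - (i + 1))).filter (fun v => pvAdj G i v)).map (fun v => (Int.ofNat v))
  else
    ((List.range k).filter (fun w => ¬ pvAdj G w i)).map (fun w => (Int.ofNat w))

theorem pvAppendAt_length (xs : List (List Int)) (i : Nat) (x : Int) :
    (pvAppendAt xs i x).length = xs.length := by
  simp [pvAppendAt]

theorem pvAppendAt_getD (xs : List (List Int)) (i : Nat) (x : Int) (hi : i < xs.length) (j : Nat) :
    (pvAppendAt xs i x).getD j [] = if j = i then xs.getD i [] ++ [x] else xs.getD j [] := by
  simp only [pvAppendAt, List.getD_eq_getElem?_getD, List.getElem?_set]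
  split
  · rename_i h
    subst h
    simp [hi]
  · rename_i h
    rw [if_neg (fun hh => h hh.symm)]

def pvInner (G : List (List Int)) (u : Nat) (l : List Nat) (acc : List (List Int)) : List (List Int) :=
  l.foldl
    (fun acc v =>
      if pvAdj G u v then pvAppendAt acc u (Int.ofNat v)
      else pvAppendAt acc v (Int.ofNat u))
    acc

theorem pvInner_length (G : List (List Int)) (u : Nat) (l : List Nat) (acc : List (List Int)) :
    (pvInner G u l acc).length = acc.length := by
  induction l generalizing acc with
  | nil => rfl
  | cons v t ih =>
      simp only [pvInner, List.foldl_cons]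
      rw [show ∀ a, List.foldl _ a t = pvInner G u t a from fun _ => rfl] at *
      split <;> rw [ih, pvAppendAt_length]

theorem pvInner_getD (G : List (List Int)) (u s len : Nat) (acc : List (List Int))
    (hu : u < s) (hs : s + len ≤ acc.length) (j : Nat) :
    (pvInner G u (List.range' s len) acc).getD j [] =
      if j = u then
        acc.getD u [] ++ ((List.range' s len).filter (fun v => pvAdj G u v)).map (fun v => (Int.ofNat v))
      else if s ≤ j ∧ j < s + len ∧ ¬ pvAdj G u j then acc.getD j [] ++ [(Int.ofNat u)]
      else acc.getD j [] := by
  induction len generalizing s acc with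
  | zero =>
      simp only [List.range'_zero, pvInner, List.foldl_nil]
      split
      · simp_all
      · rw [if_neg (by omega)]
  | succ m ih =>
      have hulen : u < acc.length := by omega
      have hslen : s < acc.length := by omega
      rw [List.range'_succ]
      simp only [pvInner, List.foldl_cons]
      rw [show ∀ a, List.foldl _ a (List.range' (s+1) m) = pvInner G u (List.range' (s+1) m) a
        from fun _ => rfl]
      by_cases hadj : pvAdj G u s
      · rw [if_pos hadj]
        rw [ih (s+1) _ (by omega) (by rw [pvAppendAt_length]; omega)]
        simp only [List.filter_cons, hadj, if_pos, List.map_cons]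
        by_cases hju : j = u
        · subst hju
          rw [if_pos rfl, if_pos rfl, pvAppendAt_getD _ _ _ hulen, if_pos rfl]
          simp
        · rw [if_neg hju, if_neg hju]
          rw [pvAppendAt_getD _ _ _ hulen, if_neg hju]
          by_cases hmem : s + 1 ≤ j ∧ j < s + 1 + m ∧ ¬ pvAdj G u j
          · rw [if_pos hmem, if_pos (⟨by omega, by omega, hmem.2.2⟩ : s ≤ j ∧ j < s + (m+1) ∧ ¬ pvAdj G u j)]
          · rw [if_neg hmem, if_neg]
            intro ⟨h1, h2, h3⟩
            have hjs : j ≠ s := fun he => h3 (he ▸ hadj)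
            exact hmem ⟨by omega, by omega, h3⟩
      · rw [if_neg hadj]
        rw [ih (s+1) _ (by omega) (by rw [pvAppendAt_length]; omega)]
        simp only [List.filter_cons, hadj]
        by_cases hju : j = u
        · subst hju
          rw [if_pos rfl, if_pos rfl, pvAppendAt_getD _ _ _ hslen, if_neg (by omega : ¬ j = s)]
          simp
        · rw [if_neg hju, if_neg hju]
          by_cases hjs : j = s
          · subst hjs
            rw [if_neg (by omega : ¬ (j + 1 ≤ j ∧ j < j + 1 + m ∧ ¬ pvAdj G u j)),
              if_pos ⟨le_refl j, by omega, by simpa using hadj⟩,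
              pvAppendAt_getD _ _ _ hslen, if_pos rfl]
          · rw [pvAppendAt_getD _ _ _ hslen, if_neg hjs]
            by_cases hmem : s + 1 ≤ j ∧ j < s + 1 + m ∧ ¬ pvAdj G u j
            · rw [if_pos hmem, if_pos ⟨by omega, by omega, hmem.2.2⟩]
            · rw [if_neg hmem, if_neg]
              intro ⟨h1, h2, h3⟩
              exact hmem ⟨by omega, by omega, h3⟩

def pvOuter (G : List (List Int)) (k : Nat) : List (List Int) :=
  (List.range k).foldl
    (fun acc u => pvInner G u (List.range' (u + 1) (G.length - (u + 1))) acc)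
    ((List.range G.length).map (fun _ => ([] : List Int)))

theorem pvOuter_eq (G : List (List Int)) (k : Nat) (hk : k ≤ G.length) :
    pvOuter G k = (List.range G.length).map (pvState G k) := by
  induction k with
  | zero =>
      apply List.ext_getElem (by simp [pvOuter])
      intro i h1 h2
      simp only [pvOuter, List.range_zero, List.foldl_nil] at h1 ⊢
      simp only [List.getElem_map, List.getElem_range, pvState]
      simp
  | succ m ih =>
      have hm : m ≤ G.length := by omega
      have hlen : (pvOuter G m).length = G.length := by
        simp [ih hm]
      rw [pvOuter, List.range_succ, List.foldl_append, List.foldl_cons, List.foldl_nil]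
      rw [show (List.range m).foldl _ _ = pvOuter G m from rfl]
      apply List.ext_getElem
      · rw [pvInner_length, hlen]; simp
      · intro i h1 h2
        have hiN : i < G.length := by simpa [pvInner_length, hlen] using h1
        have hgetD : ∀ (xs : List (List Int)) (hx : i < xs.length), xs[i]'hx = xs.getD i [] := by
          intro xs hx
          simp [List.getD_eq_getElem?_getD, List.getElem?_eq_getElem hx]
        rw [hgetD _ h1, hgetD _ h2]
        rw [pvInner_getD G m (m+1) (G.length - (m+1)) (pvOuter G m) (by omega) (by omega)]
        have hrhs : ((List.range G.length).map (pvState G (m+1))).getD i [] = pvState G (m+1) i := by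
          simp [List.getD_eq_getElem?_getD, List.getElem?_map, List.getElem?_range hiN]
        rw [hrhs]
        have hacc : ∀ j, j < G.length → (pvOuter G m).getD j [] = pvState G m j := by
          intro j hj
          rw [ih hm]
          simp [List.getD_eq_getElem?_getD, List.getElem?_map, List.getElem?_range hj]
        by_cases him : i = m
        · subst him
          rw [if_pos rfl, hacc _ hiN]
          simp only [pvState, if_neg (lt_irrefl i), if_pos (Nat.lt_succ_self i)]
        · rw [if_neg him, hacc _ hiN]
          by_cases hcase : m + 1 ≤ i ∧ i < m + 1 + (G.length - (m+1)) ∧ ¬ pvAdj G m i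
          · rw [if_pos hcase]
            simp only [pvState, if_neg (by omega : ¬ i < m), if_neg (by omega : ¬ i < m + 1)]
            rw [List.range_succ, List.filter_append, List.map_append]
            simp [hcase.2.2]
          · rw [if_neg hcase]
            simp only [pvState]
            by_cases hi : i < m
            · rw [if_pos hi, if_pos (by omega : i < m + 1)]
            · rw [if_neg hi, if_neg (by omega : ¬ i < m + 1)]
              have hlarge : m < i := by omega
              have hadj : pvAdj G m i := by
                by_contra hno
                exact hcase ⟨by omega, by omega, hno⟩
              rw [List.range_succ, List.filter_append]
              simp [hadj]

-- B-side: what the inverted index contains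
theorem pvRevStep_length (n : Nat) (rev : List (PySem.Set Int)) (w : Int) (adj : List Int) :
    (pvRevStep n rev w adj).length = rev.length := by
  induction adj generalizing rev with
  | nil => rfl
  | cons x t ih =>
      simp only [pvRevStep, List.foldl_cons]
      rw [show ∀ r, List.foldl _ r t = pvRevStep n r w t from fun _ => rfl]
      split <;> simp [ih]

theorem pvRevStep_mem (n : Nat) (rev : List (PySem.Set Int)) (w : Int) (adj : List Int)
    (hlen : rev.length = n) (x : Nat) (hx : x < n) (z : Int) :
    (z ∈ (pvRevStep n rev w adj).getD x [] ↔
      z ∈ rev.getD x [] ∨ (z = w ∧ ((x : Int)) ∈ adj)) := by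
  induction adj generalizing rev with
  | nil => simp [pvRevStep]
  | cons y t ih =>
      simp only [pvRevStep, List.foldl_cons]
      rw [show ∀ r, List.foldl _ r t = pvRevStep n r w t from fun _ => rfl]
      by_cases hy : 0 ≤ y ∧ y < (n : Int)
      · rw [if_pos hy]
        have hlen' : (rev.set y.toNat (PySem.Set.add (rev.getD y.toNat []) w)).length = n := by
          simp [hlen]
        rw [ih _ hlen']
        have hgety : (rev.set y.toNat (PySem.Set.add (rev.getD y.toNat []) w)).getD x [] =
            if x = y.toNat then PySem.Set.add (rev.getD y.toNat []) w else rev.getD x [] := by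
          simp only [List.getD_eq_getElem?_getD, List.getElem?_set]
          split
          · rename_i h; subst h; simp [show y.toNat < rev.length by omega]
          · rename_i h; rw [if_neg (fun hh => h hh.symm)]
        rw [hgety]
        by_cases hxy : x = y.toNat
        · subst hxy
          have hyI : (((y.toNat : Nat) : Int)) = y := by omega
          rw [if_pos rfl]
          simp only [PySem.Set.mem_add, List.mem_cons, hyI]
          tauto
        · have hxyI : (((x : Nat) : Int)) ≠ y := by omega
          rw [if_neg hxy]
          simp only [List.mem_cons]
          constructor
          · rintro (h | ⟨h1, h2⟩)
            · exact .inl h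
            · exact .inr ⟨h1, .inr h2⟩
          · rintro (h | ⟨h1, h2 | h2⟩)
            · exact .inl h
            · exact absurd h2 hxyI
            · exact .inr ⟨h1, h2⟩
      · rw [if_neg hy]
        rw [ih _ hlen]
        have hxyI : (((x : Nat) : Int)) ≠ y := by omega
        simp only [List.mem_cons]
        constructor
        · rintro (h | ⟨h1, h2⟩)
          · exact .inl h
          · exact .inr ⟨h1, .inr h2⟩
        · rintro (h | ⟨h1, h2 | h2⟩)
          · exact .inl h
          · exact absurd h2 hxyI
          · exact .inr ⟨h1, h2⟩

theorem pvRevFold_mem (G : List (List Int)) (gs : List (List Int)) (s : Int)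
    (rev : List (PySem.Set Int)) (hlen : rev.length = G.length)
    (x : Nat) (hx : x < G.length) (z : Int) :
    ((((PySem.List.enumerate gs s).foldl
        (fun rev wa => pvRevStep G.length rev wa.1 wa.2) rev).length = G.length) ∧
     (z ∈ ((PySem.List.enumerate gs s).foldl
        (fun rev wa => pvRevStep G.length rev wa.1 wa.2) rev).getD x [] ↔
       z ∈ rev.getD x [] ∨
       ∃ k : Nat, k < gs.length ∧ z = s + (k : Int) ∧ ((x : Int)) ∈ gs.getD k [])) := by
  induction gs generalizing s rev with
  | nil => simp [PySem.List.enumerate_nil, hlen]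
  | cons a t ih =>
      rw [PySem.List.enumerate_cons]
      simp only [List.foldl_cons]
      have hlen' : (pvRevStep G.length rev s a).length = G.length := by
        rw [pvRevStep_length, hlen]
      obtain ⟨ihl, ihm⟩ := ih (s + 1) (pvRevStep G.length rev s a) hlen'
      refine ⟨ihl, ?_⟩
      rw [ihm, pvRevStep_mem G.length rev s a hlen x hx z]
      constructor
      · rintro ((h | ⟨h1, h2⟩) | ⟨k, hk, hz, hm⟩)
        · exact .inl h
        · exact .inr ⟨0, by simp, by simpa using h1, by simpa using h2⟩
        · refine .inr ⟨k + 1, ?_, by push_cast; omega, by simpa using hm⟩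
          simp only [List.length_cons]; omega
      · rintro (h | ⟨k, hk, hz, hm⟩)
        · exact .inl (.inl h)
        · cases k with
          | zero => exact .inl (.inr ⟨by simpa using hz, by simpa using hm⟩)
          | succ m =>
              refine .inr ⟨m, ?_, by push_cast at hz ⊢; omega, by simpa using hm⟩
              simp only [List.length_cons] at hk; omega

theorem pvRev_mem (G : List (List Int)) (x : Nat) (hx : x < G.length) (z : Int) :
    z ∈ (pvRev G).getD x [] ↔
      ∃ k : Nat, k < G.length ∧ z = (k : Int) ∧ ((x : Int)) ∈ G.getD k [] := by
  have h := (pvRevFold_mem G G 0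
    ((List.range G.length).map (fun _ => ([] : PySem.Set Int))) (by simp) x hx z).2
  simp only [pvRev]
  rw [h]
  have hinit : (((List.range G.length).map (fun _ => ([] : PySem.Set Int))).getD x []) = ([] : List Int) := by
    simp [List.getD_eq_getElem?_getD]
  rw [hinit]
  simp only [List.not_mem_nil, false_or]
  constructor
  · rintro ⟨k, hk, hz, hm⟩; exact ⟨k, hk, by omega, hm⟩
  · rintro ⟨k, hk, hz, hm⟩; exact ⟨k, hk, by omega, hm⟩

-- per-node agreement of the two constructions
theorem pvNode_eq (G : List (List Int)) (i : Nat) (hi : i < G.length) :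
    pvState G G.length i =
      ((List.range i).filter (fun w => ¬ (Int.ofNat w) ∈ ((pvRev G).getD i []))).map
        (fun w => (Int.ofNat w))
      ++ PySem.List.sorted
          (PySem.Set.ofList ((G.getD i []).filter
            (fun x => (i : Int) < x ∧ x < (G.length : Int))))
          (fun x => x) false := by
  simp only [pvState, if_pos hi]
  congr 1
  · -- predecessor part
    congr 1
    apply List.filter_congr
    intro w hw
    rw [List.mem_range] at hw
    have h1 : ((Int.ofNat w) ∈ (pvRev G).getD i []) ↔ ((Int.ofNat i) ∈ G.getD w []) := by
      rw [pvRev_mem G i hi]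
      constructor
      · rintro ⟨k, hk, hz, hm⟩
        have hkw : k = w := by simp only [Int.ofNat_eq_natCast] at hz; omega
        subst hkw
        exact_mod_cast hm
      · intro h
        exact ⟨w, by omega, by simp [Int.ofNat_eq_natCast], by exact_mod_cast h⟩
    have h2 : pvAdj G w i = true ↔ ((Int.ofNat i) ∈ G.getD w []) := by
      simp [pvAdj]
    simp only [decide_eq_decide]
    rw [h1, ← h2]
  · -- successor part
    symm
    apply PySem.List.sorted_eq_of_perm_of_pairwise_lt (key := fun x : Int => x)
    · -- permutation: same members, both nodup
      have hnd1 : (((List.range' (i + 1) (G.length - (i + 1))).filter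
          (fun v => pvAdj G i v)).map (fun v => (Int.ofNat v))).Nodup := by
        apply List.Nodup.map
        · intro a b hab; exact Int.ofNat.inj hab
        · exact (List.nodup_range').filter _
      have hnd2 := PySem.Set.nodup_ofList ((G.getD i []).filter
            (fun x => decide ((i : Int) < x ∧ x < (G.length : Int))))
      rw [List.perm_ext_iff_of_nodup hnd1 hnd2]
      intro z
      rw [PySem.Set.mem_ofList, List.mem_filter, List.mem_map]
      constructor
      · rintro ⟨v, hv, rfl⟩
        rw [List.mem_filter, List.mem_range'_1] at hv
        obtain ⟨⟨hv1, hv2⟩, hv3⟩ := hv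
        constructor
        · have : (Int.ofNat v) ∈ G.getD i [] := by
            simpa [pvAdj] using hv3
          exact this
        · simp only [decide_eq_true_eq, Int.ofNat_eq_natCast]
          constructor <;> omega
      · rintro ⟨hz, hb⟩
        simp only [decide_eq_true_eq] at hb
        refine ⟨z.toNat, ?_, by simp only [Int.ofNat_eq_natCast]; omega⟩
        rw [List.mem_filter, List.mem_range'_1]
        refine ⟨⟨by omega, by omega⟩, ?_⟩
        simp only [pvAdj, List.contains_iff_mem]
        have : Int.ofNat z.toNat = z := by simp only [Int.ofNat_eq_natCast]; omega
        rw [this]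
        exact hz
    · -- strictly increasing
      have hpw : ((List.range' (i + 1) (G.length - (i + 1))).filter
          (fun v => pvAdj G i v)).Pairwise (· < ·) :=
        (List.pairwise_lt_range').filter _
      exact hpw.map _ (fun a b h => by simpa using Int.ofNat_lt.mpr h)

-- ===== VERDICT (by name: the statement is the Claim_ definition above) =====
theorem orienta_grafo_completo_spec : Claim_equal_orienta_grafo_completo := by
  intro G _
  unfold Spec_orienta_grafo_completo
  show pvOuter G G.length = orienta_grafo_completo_alt G
  rw [pvOuter_eq G G.length (le_refl _)]
  unfold orienta_grafo_completo_alt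
  apply List.map_congr_left
  intro i hi
  rw [List.mem_range] at hi
  exact pvNode_eq G i hi
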